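-- pv_equiv track=rewrite | github.com/HLR/SpaRTUN | Creating_story_v2.py | extract_shared_part
-- ===== SOURCE A (Python) =====
-- def extract_shared_part(relation_list):
--
--     _max = 1
--     max_rel = []
--
--     if len(relation_list) - relation_list.count([]) < 2 :
--         return _max, max_rel
--
--     num_of_shared = {}
--     for rel in relation_list:
--         if rel:
--             if tuple(rel) not in num_of_shared: num_of_shared[tuple(rel)] = relation_list.count(rel)
--
--     #find the highest
--
--     for i in num_of_shared:
--         if num_of_shared[i] > _max :
--             _max = num_of_shared[i]
--             max_rel = list(i)
--         elif num_of_shared[i] == _max and _max > 1 and len(i) > len(max_rel):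
--             _max = num_of_shared[i]
--             max_rel = list(i)
--
--
--     return _max,max_rel
-- ===== SOURCE B (Python) =====
-- def extract_shared_part(relation_list):
--     # Sort the non-empty relations, count repeats by grouping adjacent equal runs,
--     # then return the first relation in the original list that attains the best
--     # (count, length) key; (1, []) when nothing repeats.
--     rels = sorted(rel for rel in relation_list if rel)
--     groups = []
--     i = 0
--     while i < len(rels):
--         j = i
--         while j < len(rels) and rels[j] == rels[i]:
--             j += 1
--         if j - i > 1:
--             groups.append((j - i, rels[i]))
--         i = j
--     if not groups:
--         return 1, []
--     best = max((c, len(r)) for c, r in groups)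
--     winners = [r for c, r in groups if (c, len(r)) == best]
--     for rel in relation_list:
--         if rel in winners:
--             return best[0], rel
-- ===== Notes on version B (the rewrite author's own statement) =====
-- stated objective: alternative
-- what changed: A builds a dict keyed by each distinct non-empty relation via repeated relation_list.count scans and picks the winner with a running-max loop over the dict; B sorts the non-empty relations, obtains each repeat count by grouping adjacent-equal runs of the sorted list, takes the max (count, length) key over the groups, and returns the first relation in the original list attaining it.
import Mathlib
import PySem

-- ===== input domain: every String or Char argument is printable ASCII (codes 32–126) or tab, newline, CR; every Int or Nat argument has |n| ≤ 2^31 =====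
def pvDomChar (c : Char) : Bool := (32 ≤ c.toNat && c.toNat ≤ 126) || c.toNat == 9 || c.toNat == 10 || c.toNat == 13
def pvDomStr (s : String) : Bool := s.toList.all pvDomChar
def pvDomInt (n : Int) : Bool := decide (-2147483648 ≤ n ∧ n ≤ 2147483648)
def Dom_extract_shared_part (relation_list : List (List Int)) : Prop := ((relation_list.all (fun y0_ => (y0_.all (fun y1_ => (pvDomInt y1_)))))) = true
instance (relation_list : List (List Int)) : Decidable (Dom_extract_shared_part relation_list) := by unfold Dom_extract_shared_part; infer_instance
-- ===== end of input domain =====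

-- B replaces A's dict of `relation_list.count` scans and its running-max loop by
-- sorting the non-empty relations, counting repeats as adjacent-equal runs of the
-- sorted list, and a final first-occurrence scan (objective: alternative).

-- ===== PORT A =====
def extract_shared_part (relation_list : List (List Int)) : Int × List Int :=
  let _max : Int := 1
  let max_rel : List Int := []
  if (relation_list.length : Int) - (PySem.List.count relation_list ([] : List Int) : Int) < 2 then
    (_max, max_rel)
  else
    let num_of_shared : PySem.Dict (List Int) Int :=
      relation_list.foldl (fun d rel =>
        if rel ≠ [] then
          if d.contains rel then d
          else d.insert rel ((PySem.List.count relation_list rel : Int))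
        else d) PySem.Dict.empty
    num_of_shared.items.foldl (fun s p =>
      if p.2 > s.1 then (p.2, p.1)
      else if p.2 = s.1 ∧ s.1 > 1 ∧ p.1.length > s.2.length then (p.2, p.1)
      else s) (_max, max_rel)

-- ===== PORT B =====
-- the grouping while-loop of Source B: consume one adjacent-equal run at a time
def pvRuns : List (List Int) → List (Int × List Int)
  | [] => []
  | x :: xs =>
    let c : Int := ((xs.takeWhile (fun y => y == x)).length : Int) + 1
    if 1 < c then (c, x) :: pvRuns (xs.dropWhile (fun y => y == x))
    else pvRuns (xs.dropWhile (fun y => y == x))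
termination_by l => l.length
decreasing_by all_goals
  exact Nat.lt_succ_of_le (List.length_dropWhile_le _ _)

def extract_shared_part_alt (relation_list : List (List Int)) : Int × List Int :=
  let rels := PySem.List.sorted (relation_list.filter (fun r => decide (r ≠ []))) (fun x => x) false
  let groups := pvRuns rels
  if groups = [] then (1, [])
  else
    match PySem.List.max2? (groups.map (fun g => (g.1, (g.2.length : Int)))) (fun p => p.1) (fun p => p.2) with
    | none => (1, [])  -- unreachable: groups ≠ []
    | some best =>
      let winners := (groups.filter (fun g => g.1 == best.1 && ((g.2.length : Int) == best.2))).map (fun g => g.2)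
      match relation_list.find? (fun rel => winners.contains rel) with
      | some rel => (best.1, rel)
      | none => (1, [])  -- unreachable: some winner occurs in relation_list

-- ===== PRECONDITION & SPEC =====
def Spec_extract_shared_part (relation_list : List (List Int)) (out : Int × List Int) : Prop := out = extract_shared_part_alt relation_list
instance (relation_list : List (List Int)) (out : Int × List Int) : Decidable (Spec_extract_shared_part relation_list out) := by unfold Spec_extract_shared_part; infer_instance

-- ===== CLAIM (what is proved, stated in full; the proofs are below) =====
def Claim_equal_extract_shared_part : Prop := ∀ (relation_list : List (List Int)), Dom_extract_shared_part relation_list → Spec_extract_shared_part relation_list (extract_shared_part relation_list)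

-- ===== LEMMAS AND PROOFS =====

-- A's selection-loop body (second for-loop of A), named for the proofs.
def pvStepA (s : Int × List Int) (p : List Int × Int) : Int × List Int :=
  if p.2 > s.1 then (p.2, p.1)
  else if p.2 = s.1 ∧ s.1 > 1 ∧ p.1.length > s.2.length then (p.2, p.1)
  else s

-- strict lexicographic order on (count, length) keys, as a Bool
def pvLtb (a b : Int × Int) : Bool := decide (a.1 < b.1) || (decide (a.1 = b.1) && decide (a.2 < b.2))

-- running lexicographic maximum
def pvLexMax (a : Int × Int) (l : List (Int × Int)) : Int × Int :=
  l.foldl (fun m x => if pvLtb m x then x else m) a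

-- m is a maximum of the candidate list l (depends on l only through membership)
def pvIsMax (m : Int × Int) (l : List (Int × Int)) : Prop :=
  m ∈ l ∧ ∀ x ∈ l, pvLtb m x = false

-- the (count, length) key of a relation, counts taken in rl
def pvKey (rl : List (List Int)) (k : List Int) : Int × Int :=
  ((List.count k rl : Int), (k.length : Int))

lemma pvAnyBeq (s : List (List Int)) (x : List Int) : (s.any fun y => y == x) = decide (x ∈ s) := by
  induction s with
  | nil => simp
  | cons a t ih =>
    by_cases h : a = x
    · simp [h, ih]
    · have h2 : (a == x) = false := by simpa using h
      have h3 : ¬ (x = a) := fun e => h e.symm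
      simp [h2, h3, ih]

-- A's dict-building loop over fresh keys: first-occurrence distinct keys, each with value c k.
lemma pvDictA (c : List Int → Int) (l : List (List Int)) : ∀ (s : List (List Int)),
    (l.foldl (fun d rel => if d.contains rel then d else d.insert rel (c rel))
        (PySem.Dict.mk (s.map (fun k => (k, c k))))).items
      = (PySem.Set.update s l).map (fun k => (k, c k)) := by
  induction l with
  | nil => intro s; simp [PySem.Set.update]
  | cons x l ih =>
    intro s
    have hcont : (PySem.Dict.mk (s.map (fun k => (k, c k)))).contains x = decide (x ∈ s) := by
      simp only [PySem.Dict.contains, List.any_map, Function.comp_def]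
      exact pvAnyBeq s x
    by_cases hx : x ∈ s
    · have hset : PySem.Set.add s x = s := by
        simp [PySem.Set.add, PySem.Set.contains, List.contains_eq_mem, hx]
      simp only [List.foldl_cons, PySem.Set.update, hcont, hx, decide_true, if_pos]
      simpa [PySem.Set.update, hset] using ih s
    · have hset : PySem.Set.add s x = s ++ [x] := by
        simp [PySem.Set.add, PySem.Set.contains, List.contains_eq_mem, hx]
      have hins : (PySem.Dict.mk (s.map (fun k => (k, c k)))).insert x (c x)
          = PySem.Dict.mk ((s ++ [x]).map (fun k => (k, c k))) := by
        apply PySem.Dict.ext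
        rw [PySem.Dict.items_insert_of_not_contains _ _ (by simp [hcont, hx])]
        simp
      simp only [List.foldl_cons, PySem.Set.update, hcont, hx, decide_false, Bool.false_eq_true,
        if_neg, not_false_iff, hins]
      simpa [PySem.Set.update, hset] using ih (s ++ [x])

lemma pvDictA0 (c : List Int → Int) (l : List (List Int)) :
    (l.foldl (fun d rel => if d.contains rel then d else d.insert rel (c rel))
        (PySem.Dict.empty : PySem.Dict (List Int) Int)).items
      = (PySem.Set.ofList l).map (fun k => (k, c k)) := by
  simpa [PySem.Set.update, PySem.Set.ofList] using pvDictA c l []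

lemma pvNzLen (l : List (List Int)) :
    (l.filter (fun x => decide (x ≠ []))).length + List.count ([] : List Int) l = l.length := by
  induction l with
  | nil => simp
  | cons x t ih => by_cases hx : x = [] <;> simp [hx] at ih ⊢ <;> omega

-- A rewritten to its guard plus a pvStepA fold over its dict's items.
lemma pvA_char (rl : List (List Int)) :
    extract_shared_part rl =
      if (rl.length : Int) - (List.count ([] : List Int) rl : Int) < 2 then (1, [])
      else ((PySem.Set.ofList (rl.filter (fun x => decide (x ≠ [])))).map
              (fun k => (k, (List.count k rl : Int)))).foldl pvStepA (1, []) := by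
  simp only [extract_shared_part, PySem.List.count]
  by_cases hg : (rl.length : Int) - (List.count ([] : List Int) rl : Int) < 2
  · rw [if_pos hg, if_pos hg]
  · rw [if_neg hg, if_neg hg]
    rw [PySem.List.foldl_ite_eq_foldl_filter (p := fun rel : List Int => rel ≠ [])
      (f := fun (d : PySem.Dict (List Int) Int) rel =>
        if d.contains rel then d else d.insert rel ((List.count rel rl : Int)))]
    rw [pvDictA0 (fun rel => (List.count rel rl : Int))]
    rfl

-- basic facts about the lexicographic key order
lemma pvLtb_total {a b : Int × Int} (h1 : pvLtb a b = false) (h2 : pvLtb b a = false) : a = b := by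
  simp only [pvLtb] at *; rcases a with ⟨a1,a2⟩; rcases b with ⟨b1,b2⟩
  simp at h1 h2 ⊢; omega

lemma pvIsMax_uniq {m m' : Int × Int} {l : List (Int × Int)}
    (h : pvIsMax m l) (h' : pvIsMax m' l) : m = m' := by
  exact pvLtb_total (h'.2 m h.1) (h.2 m' h'.1) |>.symm

lemma pvLtb_irrefl (a : Int × Int) : pvLtb a a = false := by
  simp [pvLtb]

lemma pvLtb_le_trans {m a y : Int × Int} (h1 : pvLtb m a = false) (h2 : pvLtb a y = false) :
    pvLtb m y = false := by
  rcases m with ⟨m1,m2⟩; rcases a with ⟨a1,a2⟩; rcases y with ⟨y1,y2⟩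
  simp [pvLtb] at *; omega

lemma pvLtb_lt_le {m a y : Int × Int} (h1 : pvLtb a y = true) (h2 : pvLtb m y = false) :
    pvLtb m a = false := by
  rcases m with ⟨m1,m2⟩; rcases a with ⟨a1,a2⟩; rcases y with ⟨y1,y2⟩
  simp [pvLtb] at *; omega

lemma pvLexMax_isMax (l : List (Int × Int)) : ∀ (a : Int × Int), pvIsMax (pvLexMax a l) (a :: l) := by
  induction l with
  | nil =>
    intro a
    refine ⟨by simp [pvLexMax], ?_⟩
    intro x hx
    rcases List.mem_cons.mp hx with rfl | hx
    · exact pvLtb_irrefl x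
    · simp at hx
  | cons y t ih =>
    intro a
    rcases hb : pvLtb a y with _ | _
    · have h2 : pvLexMax a (y :: t) = pvLexMax a t := by
        show pvLexMax (if pvLtb a y then y else a) t = pvLexMax a t
        rw [hb]; rfl
      rcases ih a with ⟨hm, hbd⟩
      rw [h2]
      constructor
      · rcases List.mem_cons.mp hm with he | hm
        · simp [he]
        · simp [hm]
      · intro x hx
        rcases List.mem_cons.mp hx with rfl | hx2
        · exact hbd x (by simp)
        · rcases List.mem_cons.mp hx2 with rfl | hx3
          · exact pvLtb_le_trans (hbd a (by simp)) hb
          · exact hbd x (by simp [hx3])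
    · have h2 : pvLexMax a (y :: t) = pvLexMax y t := by
        show pvLexMax (if pvLtb a y then y else a) t = pvLexMax y t
        rw [hb]; rfl
      rcases ih y with ⟨hm, hbd⟩
      rw [h2]
      constructor
      · rcases List.mem_cons.mp hm with he | hm
        · simp [he]
        · simp [hm]
      · intro x hx
        rcases List.mem_cons.mp hx with rfl | hx2
        · exact pvLtb_lt_le hb (hbd y (by simp))
        · rcases List.mem_cons.mp hx2 with rfl | hx3
          · exact hbd x (by simp)
          · exact hbd x (by simp [hx3])

-- the fold step of A's selection loop, specialised through the key order
lemma pvStepA_key (c : List Int → Int) (k0 k : List Int) (h0 : 1 < c k0) :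
    pvStepA (c k0, k0) (k, c k)
      = (if pvLtb (c k0, (k0.length : Int)) (c k, (k.length : Int)) then (c k, k) else (c k0, k0)) := by
  simp only [pvStepA, pvLtb]
  split_ifs <;> simp_all <;> omega

-- the instance bridge: B's sorted (core List order) is sorted under the LinearOrder on List ℤ
lemma pvSortedEq (P : List (List Int)) :
    @PySem.List.sorted (List ℤ) (List ℤ) List.instLT (fun a b => a.decidableLT b) P (fun x => x) false
      = @PySem.List.sorted (List ℤ) (List ℤ) List.instLinearOrder.toLT LinearOrder.toDecidableLT P (fun x => x) false := by
  congr 1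

-- max2?'s fold condition is the lexicographic comparison pvLtb
lemma pvCondEq (m x : Int × Int) :
    (decide (m.1 < x.1) || (!decide (x.1 < m.1) && decide (m.2 < x.2))) = pvLtb m x := by
  rw [Bool.eq_iff_iff]; simp [pvLtb]; omega

lemma pvMax2Go (t : List (Int × Int)) : ∀ (a : Int × Int),
    t.foldl (fun acc x =>
      match acc with
      | none => some x
      | some m => if (decide (m.1 < x.1) || (!decide (x.1 < m.1) && decide (m.2 < x.2))) = true
                  then some x else some m) (some a)
      = some (pvLexMax a t) := by
  induction t with
  | nil => intro a; simp [pvLexMax]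
  | cons y t ih =>
    intro a
    have h1 : pvLexMax a (y :: t) = pvLexMax (if pvLtb a y then y else a) t := rfl
    rw [List.foldl_cons, h1, ← ih]
    rcases hb : pvLtb a y <;> simp [pvCondEq a y, hb]

lemma pvMax2Eq (a : Int × Int) (t : List (Int × Int)) :
    PySem.List.max2? (a :: t) (fun p => p.1) (fun p => p.2) = some (pvLexMax a t) := by
  simp only [PySem.List.max2?, List.foldl_cons]
  convert pvMax2Go t a using 2
  funext acc x
  rcases acc with _ | m
  · rfl
  · congr 1

lemma pvFindCongr {p q : List Int → Bool} : ∀ {l : List (List Int)},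
    (∀ x ∈ l, p x = q x) → l.find? p = l.find? q := by
  intro l; induction l with
  | nil => intro _; rfl
  | cons x t ih =>
    intro h
    rw [List.find?_cons, List.find?_cons, h x (by simp)]
    rcases q x <;> simp [ih (fun y hy => h y (by simp [hy]))]

-- find? over the distinct-elements list keeps the first match of the underlying list
lemma pvFindUpdate (q : List Int → Bool) : ∀ (l s : List (List Int)),
    List.find? q (PySem.Set.update s l)
      = (match List.find? q s with
         | some r => some r
         | none => List.find? (fun x => q x && !(decide (x ∈ s))) l) := by
  intro l
  induction l with
  | nil =>
    intro s
    simp only [PySem.Set.update, List.foldl_nil]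
    rcases h : List.find? q s <;> simp [h]
  | cons x l ih =>
    intro s
    have hupd : PySem.Set.update s (x :: l) = PySem.Set.update (PySem.Set.add s x) l := by
      simp [PySem.Set.update]
    rw [hupd]
    by_cases hx : x ∈ s
    · have hadd : PySem.Set.add s x = s := by
        simp [PySem.Set.add, PySem.Set.contains, List.contains_eq_mem, hx]
      rw [hadd, ih s]
      rcases h : List.find? q s with _ | r
      · have hpx : (q x && !(decide (x ∈ s))) = false := by simp [hx]
        rw [List.find?_cons, hpx]
      · rfl
    · have hadd : PySem.Set.add s x = s ++ [x] := by
        simp [PySem.Set.add, PySem.Set.contains, List.contains_eq_mem, hx]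
      rw [hadd, ih (s ++ [x])]
      rw [List.find?_append]
      rcases h : List.find? q s with _ | r
      · simp only [Option.or]
        rcases hqx : q x with _ | _
        · have h1 : List.find? q [x] = none := by simp [List.find?_cons, hqx]
          rw [h1]
          have h2 : List.find? (fun y => q y && !(decide (y ∈ s ++ [x]))) l
              = List.find? (fun y => q y && !(decide (y ∈ s))) l := by
            apply pvFindCongr
            intro y _
            by_cases hyx : y = x
            · subst hyx; simp [hqx]
            · simp [List.mem_append, hyx]
          have h3 : (q x && !(decide (x ∈ s))) = false := by simp [hqx]
          rw [h2, List.find?_cons, h3]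
        · have h1 : List.find? q [x] = some x := by simp [List.find?_cons, hqx]
          have h3 : (q x && !(decide (x ∈ s))) = true := by simp [hqx, hx]
          rw [h1, List.find?_cons, h3]
      · rfl

lemma pvFindOfList (q : List Int → Bool) (l : List (List Int)) :
    List.find? q (PySem.Set.ofList l) = List.find? q l := by
  have h := pvFindUpdate q l []
  have h0 : PySem.Set.update ([] : List (List Int)) l = PySem.Set.ofList l := by
    simp [PySem.Set.update, PySem.Set.ofList]
  rw [h0] at h
  rw [h]
  simp only [List.find?_nil]
  apply pvFindCongr
  intro y _
  simp

-- on a sorted list, occurrences of the head are exactly the initial run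
lemma pvSortedCountHead (x : List Int) : ∀ (xs : List (List Int)),
    (x :: xs).Pairwise (fun a b => a ≤ b) →
    List.count x xs = (xs.takeWhile (fun y => y == x)).length := by
  intro xs
  induction xs with
  | nil => intro _; simp
  | cons y ys ih =>
    intro h
    rcases List.pairwise_cons.mp h with ⟨hx, hyys⟩
    by_cases hyx : y = x
    · subst hyx
      have hpair : (y :: ys).Pairwise (fun a b => a ≤ b) := hyys
      have := ih (by
        constructor
        · exact fun z hz => hx z (List.mem_cons_of_mem _ hz)
        · exact (List.pairwise_cons.mp hyys).2)
      simp [List.count_cons, this, List.takeWhile_cons]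
    · have hxy : x < y := lt_of_le_of_ne (hx y (by simp)) (fun e => hyx e.symm)
      have hnot : x ∉ y :: ys := by
        intro hmem
        rcases List.mem_cons.mp hmem with he | hmem
        · exact hyx he.symm
        · have hyx2 : y ≤ x := (List.pairwise_cons.mp hyys).1 x hmem
          exact absurd hxy (not_lt.mpr hyx2)
      have hc : List.count x (y :: ys) = 0 := List.count_eq_zero.mpr hnot
      have hyxb : (y == x) = false := by simpa using hyx
      simp [hc, List.takeWhile_cons, hyxb]

lemma pvCountDropNe (x r : List Int) (xs : List (List Int)) (h : r ≠ x) :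
    List.count r (xs.dropWhile (fun y => y == x)) = List.count r xs := by
  conv_rhs => rw [← List.takeWhile_append_dropWhile (p := fun y => y == x) (l := xs)]
  rw [List.count_append]
  have h0 : List.count r (xs.takeWhile (fun y => y == x)) = 0 := by
    rw [List.count_eq_zero]
    intro hm
    exact h (by simpa using List.mem_takeWhile_imp hm)
  omega

lemma pvCountTakeLen (x : List Int) (xs : List (List Int)) :
    List.count x (xs.takeWhile (fun y => y == x)) = (xs.takeWhile (fun y => y == x)).length := by
  rw [List.count_eq_length]
  intro b hb
  have hb2 := List.mem_takeWhile_imp hb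
  have : b = x := by simpa using hb2
  exact this.symm

lemma pvNotMemDrop (x : List Int) (xs : List (List Int))
    (h : (x :: xs).Pairwise (fun a b => a ≤ b)) :
    x ∉ xs.dropWhile (fun y => y == x) := by
  have h1 := pvSortedCountHead x xs h
  have h2 := pvCountTakeLen x xs
  have h3 : List.count x (xs.takeWhile (fun y => y == x)) + List.count x (xs.dropWhile (fun y => y == x)) = List.count x xs := by
    rw [← List.count_append, List.takeWhile_append_dropWhile]
  intro hmem
  have h4 : 0 < List.count x (xs.dropWhile (fun y => y == x)) := List.count_pos_iff.mpr hmem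
  omega

-- the runs of a sorted list are exactly the repeated values with their counts
lemma pvRuns_mem : ∀ (s : List (List Int)), s.Pairwise (fun a b => a ≤ b) →
    ∀ (n : Int) (r : List Int),
      ((n, r) ∈ pvRuns s ↔ (n = (List.count r s : Int) ∧ 1 < n)) := by
  intro s
  induction s using pvRuns.induct with
  | case1 =>
    intro _ n r
    simp [pvRuns]
    omega
  | case2 x xs c hc ih =>
    intro h n r
    have hd : (List.dropWhile (fun y => y == x) xs).Pairwise (fun a b => a ≤ b) :=
      List.Pairwise.sublist
        (List.Sublist.trans (List.dropWhile_sublist _) (List.sublist_cons_self x xs)) h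
    have ih' := ih hd
    have hcnti : ((List.count x (x :: xs) : Nat) : Int)
        = ((xs.takeWhile (fun y => y == x)).length : Int) + 1 := by
      have hcnt := pvSortedCountHead x xs h
      have : List.count x (x :: xs) = (xs.takeWhile (fun y => y == x)).length + 1 := by
        simp [List.count_cons, hcnt]
      rw [this]
      push_cast
      ring
    have hxd : x ∉ xs.dropWhile (fun y => y == x) := pvNotMemDrop x xs h
    have hrun : pvRuns (x :: xs)
        = (((xs.takeWhile (fun y => y == x)).length : Int) + 1, x)
            :: pvRuns (xs.dropWhile (fun y => y == x)) := by
      rw [pvRuns, if_pos hc]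
    have hnn := Int.natCast_nonneg (xs.takeWhile (fun y => y == x)).length
    rw [hrun]
    by_cases hrx : r = x
    · constructor
      · intro hm
        rcases List.mem_cons.mp hm with he | hm2
        · have hn : n = ((xs.takeWhile (fun y => y == x)).length : Int) + 1 :=
            (Prod.ext_iff.mp he).1
          exact ⟨by rw [hrx, hcnti, hn], by omega⟩
        · exfalso
          rcases (ih' n r).mp hm2 with ⟨h1, h2⟩
          have hpos : 0 < List.count r (xs.dropWhile (fun y => y == x)) := by omega
          rw [hrx] at hpos
          exact hxd (List.count_pos_iff.mp hpos)
      · rintro ⟨h1, h2⟩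
        apply List.mem_cons.mpr
        left
        rw [Prod.ext_iff]
        refine ⟨?_, hrx⟩
        rw [h1, hrx, hcnti]
    · have hxrb : (x == r) = false := by
        simp only [beq_eq_false_iff_ne, ne_eq]
        exact fun e => hrx e.symm
      have hcr : List.count r (x :: xs) = List.count r (xs.dropWhile (fun y => y == x)) := by
        rw [List.count_cons, pvCountDropNe x r xs hrx, hxrb]
        simp
      constructor
      · intro hm
        rcases List.mem_cons.mp hm with he | hm2
        · exact absurd (Prod.ext_iff.mp he).2 hrx
        · rcases (ih' n r).mp hm2 with ⟨h1, h2⟩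
          exact ⟨by rw [h1, hcr], h2⟩
      · rintro ⟨h1, h2⟩
        exact List.mem_cons_of_mem _ ((ih' n r).mpr ⟨by rw [h1, hcr], h2⟩)
  | case3 x xs c hc ih =>
    intro h n r
    have hd : (List.dropWhile (fun y => y == x) xs).Pairwise (fun a b => a ≤ b) :=
      List.Pairwise.sublist
        (List.Sublist.trans (List.dropWhile_sublist _) (List.sublist_cons_self x xs)) h
    have ih' := ih hd
    have hlen0 : (xs.takeWhile (fun y => y == x)).length = 0 := by
      by_contra hne
      exact hc (by push_cast; omega)
    have hcnt : List.count x (x :: xs) = 1 := by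
      have := pvSortedCountHead x xs h
      simp [List.count_cons, this, hlen0]
    have hxd : x ∉ xs.dropWhile (fun y => y == x) := pvNotMemDrop x xs h
    have hrun : pvRuns (x :: xs) = pvRuns (xs.dropWhile (fun y => y == x)) := by
      rw [pvRuns, if_neg hc]
    rw [hrun]
    by_cases hrx : r = x
    · constructor
      · intro hm
        exfalso
        rcases (ih' n r).mp hm with ⟨h1, h2⟩
        have hpos : 0 < List.count r (xs.dropWhile (fun y => y == x)) := by omega
        rw [hrx] at hpos
        exact hxd (List.count_pos_iff.mp hpos)
      · rintro ⟨h1, h2⟩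
        rw [hrx, hcnt] at h1
        omega
    · have hxrb : (x == r) = false := by
        simp only [beq_eq_false_iff_ne, ne_eq]
        exact fun e => hrx e.symm
      have hcr : List.count r (x :: xs) = List.count r (xs.dropWhile (fun y => y == x)) := by
        rw [List.count_cons, pvCountDropNe x r xs hrx, hxrb]
        simp
      rw [ih' n r, hcr]

-- A's selection loop, once the accumulator holds a repeated relation
lemma pvLgo (rl : List (List Int)) : ∀ (D : List (List Int)) (k0 : List Int),
    1 < (List.count k0 rl : Int) →
    D.foldl (fun s k => pvStepA s (k, (List.count k rl : Int))) ((List.count k0 rl : Int), k0)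
      = (if pvKey rl k0 = pvLexMax (pvKey rl k0) (D.map (pvKey rl))
         then ((pvLexMax (pvKey rl k0) (D.map (pvKey rl))).1, k0)
         else ((pvLexMax (pvKey rl k0) (D.map (pvKey rl))).1,
               match D.find? (fun k => pvKey rl k == pvLexMax (pvKey rl k0) (D.map (pvKey rl))) with
               | some w => w
               | none => k0)) := by
  intro D
  induction D with
  | nil =>
    intro k0 h0
    simp [pvLexMax, pvKey]
  | cons x D' ih =>
    intro k0 h0
    rw [List.foldl_cons]
    rw [show pvStepA ((List.count k0 rl : Int), k0) (x, (List.count x rl : Int))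
          = (if pvLtb (pvKey rl k0) (pvKey rl x)
             then ((List.count x rl : Int), x) else ((List.count k0 rl : Int), k0))
        from pvStepA_key (fun k => (List.count k rl : Int)) k0 x h0]
    by_cases hb : pvLtb (pvKey rl k0) (pvKey rl x) = true
    · have hcx : 1 < (List.count x rl : Int) := by
        have hb2 := hb
        simp only [pvKey, pvLtb, Bool.or_eq_true, Bool.and_eq_true, decide_eq_true_eq] at hb2
        omega
      rw [if_pos hb, ih x hcx]
      have hcoll : pvLexMax (pvKey rl k0) ((x :: D').map (pvKey rl))
          = pvLexMax (pvKey rl x) (D'.map (pvKey rl)) := by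
        show pvLexMax (if pvLtb (pvKey rl k0) (pvKey rl x) then pvKey rl x else pvKey rl k0)
              (D'.map (pvKey rl)) = _
        rw [hb]
        rfl
      rw [hcoll]
      have hmax := pvLexMax_isMax (D'.map (pvKey rl)) (pvKey rl x)
      have hK0ne : ¬ (pvKey rl k0 = pvLexMax (pvKey rl x) (D'.map (pvKey rl))) := by
        intro he
        have hKX := hmax.2 (pvKey rl x) (by simp)
        rw [← he] at hKX
        rw [hKX] at hb
        exact Bool.false_ne_true hb
      rw [if_neg hK0ne]
      rw [List.find?_cons]
      by_cases hxb : pvKey rl x = pvLexMax (pvKey rl x) (D'.map (pvKey rl))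
      · have hbeq : (pvKey rl x == pvLexMax (pvKey rl x) (D'.map (pvKey rl))) = true :=
          beq_iff_eq.mpr hxb
        rw [if_pos hxb, hbeq]
      · have hne : (pvKey rl x == pvLexMax (pvKey rl x) (D'.map (pvKey rl))) = false := by
          simp [hxb]
        rw [if_neg hxb, hne]
        rcases hfind : D'.find? (fun k => pvKey rl k == pvLexMax (pvKey rl x) (D'.map (pvKey rl))) with _ | w
        · exfalso
          rcases List.mem_cons.mp hmax.1 with he | hm
          · exact hxb he.symm
          · rcases List.mem_map.mp hm with ⟨k, hk, hkey⟩
            have := List.find?_eq_none.mp hfind k hk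
            rw [hkey] at this
            simp at this
        · rfl
    · have hbf : pvLtb (pvKey rl k0) (pvKey rl x) = false := by
        rcases hb2 : pvLtb (pvKey rl k0) (pvKey rl x) with _ | _
        · rfl
        · exact absurd hb2 hb
      rw [if_neg (by rw [hbf]; exact Bool.false_ne_true), ih k0 h0]
      have hcoll : pvLexMax (pvKey rl k0) ((x :: D').map (pvKey rl))
          = pvLexMax (pvKey rl k0) (D'.map (pvKey rl)) := by
        show pvLexMax (if pvLtb (pvKey rl k0) (pvKey rl x) then pvKey rl x else pvKey rl k0)
              (D'.map (pvKey rl)) = _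
        rw [hbf]
        rfl
      rw [hcoll]
      by_cases hc0 : pvKey rl k0 = pvLexMax (pvKey rl k0) (D'.map (pvKey rl))
      · rw [if_pos hc0, if_pos hc0]
      · rw [if_neg hc0, if_neg hc0]
        rw [List.find?_cons]
        have hmax := pvLexMax_isMax (D'.map (pvKey rl)) (pvKey rl k0)
        have hxne : (pvKey rl x == pvLexMax (pvKey rl k0) (D'.map (pvKey rl))) = false := by
          by_contra hcon
          have hxeq : pvKey rl x = pvLexMax (pvKey rl k0) (D'.map (pvKey rl)) := by
            simpa using hcon
          have h1 : pvLtb (pvLexMax (pvKey rl k0) (D'.map (pvKey rl))) (pvKey rl k0) = false :=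
            hmax.2 (pvKey rl k0) (by simp)
          have h2 : pvLtb (pvKey rl k0) (pvLexMax (pvKey rl k0) (D'.map (pvKey rl))) = false := by
            rcases h3 : pvLtb (pvKey rl k0) (pvLexMax (pvKey rl k0) (D'.map (pvKey rl))) with _ | _
            · rfl
            · rw [← hxeq] at h3
              exact absurd h3 hb
          exact hc0 (pvLtb_total h2 h1)
        rw [hxne]

lemma pvLtb_false_fst_le {m z : Int × Int} (h : pvLtb m z = false) : z.1 ≤ m.1 := by
  rcases m with ⟨m1, m2⟩; rcases z with ⟨z1, z2⟩
  simp [pvLtb] at h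
  omega

lemma pvLtb_big_small {m z : Int × Int} (h1 : 2 ≤ m.1) (h2 : z.1 ≤ 1) : pvLtb m z = false := by
  rcases m with ⟨m1, m2⟩; rcases z with ⟨z1, z2⟩
  simp [pvLtb]
  omega

-- A's whole selection loop from (1, [])
lemma pvLtop (rl : List (List Int)) : ∀ (D : List (List Int)),
    (∀ k ∈ D, 1 ≤ (List.count k rl : Int)) →
    D.foldl (fun s k => pvStepA s (k, (List.count k rl : Int))) (1, []) =
      (match D.filter (fun k => decide (1 < (List.count k rl : Int))) with
       | [] => ((1 : Int), ([] : List Int))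
       | r :: t =>
         ((pvLexMax (pvKey rl r) ((r :: t).map (pvKey rl))).1,
          match D.find? (fun k => pvKey rl k == pvLexMax (pvKey rl r) ((r :: t).map (pvKey rl))) with
          | some w => w
          | none => [])) := by
  intro D
  induction D with
  | nil =>
    intro _
    simp
  | cons x D' ih =>
    intro hyp
    rw [List.foldl_cons]
    by_cases hx1 : 1 < (List.count x rl : Int)
    · have hstep : pvStepA (1, []) (x, (List.count x rl : Int)) = ((List.count x rl : Int), x) := by
        simp only [pvStepA]
        rw [if_pos (by exact hx1)]
      rw [hstep, pvLgo rl D' x hx1]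
      rw [List.filter_cons_of_pos (by simpa using hx1)]
      dsimp only [List.map_cons]
      have hcoll : pvLexMax (pvKey rl x)
            (pvKey rl x :: (D'.filter (fun k => decide (1 < (List.count k rl : Int)))).map (pvKey rl))
          = pvLexMax (pvKey rl x)
            ((D'.filter (fun k => decide (1 < (List.count k rl : Int)))).map (pvKey rl)) := by
        show pvLexMax (if pvLtb (pvKey rl x) (pvKey rl x) then pvKey rl x else pvKey rl x) _ = _
        rw [ite_self]
      have hA := pvLexMax_isMax
        ((D'.filter (fun k => decide (1 < (List.count k rl : Int)))).map (pvKey rl)) (pvKey rl x)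
      have hB := pvLexMax_isMax (D'.map (pvKey rl)) (pvKey rl x)
      set Bt := pvLexMax (pvKey rl x)
        ((D'.filter (fun k => decide (1 < (List.count k rl : Int)))).map (pvKey rl)) with hBt
      set B' := pvLexMax (pvKey rl x) (D'.map (pvKey rl)) with hB'
      have hBtfst : 2 ≤ Bt.1 := by
        have h1 := pvLtb_false_fst_le (hA.2 (pvKey rl x) (by simp))
        have h2 : (pvKey rl x).1 = (List.count x rl : Int) := rfl
        omega
      have hAmax : pvIsMax Bt (pvKey rl x :: D'.map (pvKey rl)) := by
        constructor
        · rcases List.mem_cons.mp hA.1 with he | hm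
          · simp [he]
          · rcases List.mem_map.mp hm with ⟨k, hk, hkey⟩
            exact List.mem_cons_of_mem _ (List.mem_map.mpr ⟨k, List.mem_of_mem_filter hk, hkey⟩)
        · intro z hz
          rcases List.mem_cons.mp hz with he | hm
          · rw [he]
            exact hA.2 _ (by simp)
          · rcases List.mem_map.mp hm with ⟨k, hk, hkey⟩
            by_cases hk1 : 1 < (List.count k rl : Int)
            · exact hA.2 z (List.mem_cons_of_mem _
                (List.mem_map.mpr ⟨k, List.mem_filter.mpr ⟨hk, by simpa using hk1⟩, hkey⟩))
            · have hk2 : (List.count k rl : Int) = 1 := by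
                have := hyp k (List.mem_cons_of_mem _ hk)
                omega
              apply pvLtb_big_small hBtfst
              rw [← hkey]
              show (List.count k rl : Int) ≤ 1
              omega
      have hBeq : B' = Bt := pvIsMax_uniq hB hAmax
      rw [hcoll, ← hBeq]
      by_cases hxb : pvKey rl x = B'
      · rw [if_pos hxb]
        rw [List.find?_cons, beq_iff_eq.mpr hxb]
      · rw [if_neg hxb]
        rw [List.find?_cons, beq_eq_false_iff_ne.mpr hxb]
        rcases hfind : D'.find? (fun k => pvKey rl k == B') with _ | w
        · exfalso
          rcases List.mem_cons.mp (hBeq ▸ hA.1) with he | hm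
          · exact hxb he.symm
          · rcases List.mem_map.mp hm with ⟨k, hk, hkey⟩
            have := List.find?_eq_none.mp hfind k (List.mem_of_mem_filter hk)
            rw [hkey] at this
            simp at this
        · rfl
    · have hcx1 : (List.count x rl : Int) = 1 := by
        have := hyp x (by simp)
        omega
      have hstep : pvStepA (1, []) (x, (List.count x rl : Int)) = (1, []) := by
        rw [hcx1]
        simp [pvStepA]
      rw [hstep, ih (fun k hk => hyp k (List.mem_cons_of_mem _ hk))]
      rw [List.filter_cons_of_neg (by simpa using hx1)]
      rcases hfil : D'.filter (fun k => decide (1 < (List.count k rl : Int))) with _ | ⟨r, t⟩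
      · rfl
      · dsimp only
        have hmax := pvLexMax_isMax ((r :: t).map (pvKey rl)) (pvKey rl r)
        set B := pvLexMax (pvKey rl r) ((r :: t).map (pvKey rl)) with hB
        have hrfil : r ∈ D'.filter (fun k => decide (1 < (List.count k rl : Int))) := by
          rw [hfil]
          simp
        have hr1 : 1 < (List.count r rl : Int) := by
          have := List.mem_filter.mp hrfil
          simpa using this.2
      -- B's first component is at least 2, so the key of x (count 1) never matches
        have hBfst : 2 ≤ B.1 := by
          have h1 := pvLtb_false_fst_le (hmax.2 (pvKey rl r) (by simp))
          have h2 : (pvKey rl r).1 = (List.count r rl : Int) := rfl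
          omega
        have hxne : (pvKey rl x == B) = false := by
          apply beq_eq_false_iff_ne.mpr
          intro he
          have : (pvKey rl x).1 = (List.count x rl : Int) := rfl
          rw [he] at this
          omega
        rw [List.find?_cons, hxne]

-- ===== VERDICT (by name: the statement is the Claim_ definition above) =====
theorem extract_shared_part_spec : Claim_equal_extract_shared_part := by
  intro rl _
  unfold Spec_extract_shared_part
  rw [pvA_char]
  set P := rl.filter (fun x => decide (x ≠ [])) with hP
  set S := PySem.List.sorted P (fun x => x) false with hS
  have hSp : S.Perm P := PySem.List.sorted_perm P (fun x => x) false
  have hpw : S.Pairwise (fun a b => a ≤ b) := by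
    rw [hS, pvSortedEq]
    exact PySem.List.sorted_pairwise P (fun x => x)
  have hcntSP : ∀ r, List.count r S = List.count r P := fun r => hSp.count_eq r
  have hcntP : ∀ r, r ∈ P → List.count r P = List.count r rl := by
    intro r hr
    have hrne : r ≠ [] := by simpa using (List.mem_filter.mp hr).2
    rw [hP]
    exact List.count_filter (by simpa using hrne)
  have hmemP : ∀ r, r ∈ P ↔ (r ∈ rl ∧ r ≠ []) := by
    intro r
    rw [hP, List.mem_filter]
    simp
  -- repeated relations, as seen through the runs of the sorted list
  have hgmem : ∀ (n : Int) (r : List Int),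
      ((n, r) ∈ pvRuns S) ↔ (r ∈ P ∧ n = (List.count r rl : Int) ∧ 1 < n) := by
    intro n r
    rw [pvRuns_mem S hpw n r]
    constructor
    · rintro ⟨h1, h2⟩
      have hrs : r ∈ S := by
        have : 0 < List.count r S := by omega
        exact List.count_pos_iff.mp this
      have hrp : r ∈ P := (PySem.List.mem_sorted _ _ _ _).mp (hS ▸ hrs)
      refine ⟨hrp, ?_, h2⟩
      rw [h1, hcntSP, hcntP r hrp]
    · rintro ⟨hrp, h1, h2⟩
      refine ⟨?_, h2⟩
      rw [hcntSP, hcntP r hrp]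
      exact h1
  by_cases hg : (rl.length : Int) - (List.count ([] : List Int) rl : Int) < 2
  · rw [if_pos hg]
    have hgr : pvRuns S = [] := by
      rcases h : pvRuns S with _ | ⟨⟨n, r⟩, rest⟩
      · rfl
      · exfalso
        have hm : (n, r) ∈ pvRuns S := by rw [h]; simp
        rcases (hgmem n r).mp hm with ⟨hrp, h1, h2⟩
        have hc2 : 2 ≤ List.count r rl := by omega
        have hcle : List.count r P ≤ P.length := List.count_le_length
        have hnz := pvNzLen rl
        rw [← hP] at hnz
        rw [hcntP r hrp] at hcle
        have hc0 : List.count ([] : List Int) rl ≤ rl.length := List.count_le_length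
        omega
    simp only [extract_shared_part_alt]
    rw [← hP, ← hS, hgr]
    simp
  · rw [if_neg hg]
    rw [List.foldl_map]
    set D := PySem.Set.ofList P with hD
    have hmemD : ∀ r, r ∈ D ↔ r ∈ P := fun r => by rw [hD]; exact PySem.Set.mem_ofList P r
    have hyp1 : ∀ k ∈ D, 1 ≤ (List.count k rl : Int) := by
      intro k hk
      have hkp : k ∈ P := (hmemD k).mp hk
      have : k ∈ rl := ((hmemP k).mp hkp).1
      have := List.count_pos_iff.mpr this
      omega
    rw [pvLtop rl D hyp1]
    rcases hRep : D.filter (fun k => decide (1 < (List.count k rl : Int))) with _ | ⟨r0, t0⟩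
    · -- no repeated relation at all
      have hgr : pvRuns S = [] := by
        rcases h : pvRuns S with _ | ⟨⟨n, r⟩, rest⟩
        · rfl
        · exfalso
          have hm : (n, r) ∈ pvRuns S := by rw [h]; simp
          rcases (hgmem n r).mp hm with ⟨hrp, h1, h2⟩
          have hrfil : r ∈ D.filter (fun k => decide (1 < (List.count k rl : Int))) :=
            List.mem_filter.mpr ⟨(hmemD r).mpr hrp, by simp; omega⟩
          rw [hRep] at hrfil
          simp at hrfil
      simp only [extract_shared_part_alt]
      rw [← hP, ← hS, hgr]
      simp
    · -- there is a repeated relation; both sides pick the same maximum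
      set B0 := pvLexMax (pvKey rl r0) ((r0 :: t0).map (pvKey rl)) with hB0
      have hmax0 := pvLexMax_isMax ((r0 :: t0).map (pvKey rl)) (pvKey rl r0)
      rw [← hB0] at hmax0
      have hr0fil : r0 ∈ D.filter (fun k => decide (1 < (List.count k rl : Int))) := by
        rw [hRep]; simp
      have hr0D : r0 ∈ D := List.mem_of_mem_filter hr0fil
      have hr01 : 1 < (List.count r0 rl : Int) := by
        have := (List.mem_filter.mp hr0fil).2
        simpa using this
      have hB0fst : 2 ≤ B0.1 := by
        have h1 := pvLtb_false_fst_le (hmax0.2 (pvKey rl r0) (by simp))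
        have h2 : (pvKey rl r0).1 = (List.count r0 rl : Int) := rfl
        omega
      have hCmem : ∀ z, (z ∈ (r0 :: t0).map (pvKey rl))
          ↔ ∃ k, k ∈ D ∧ 1 < (List.count k rl : Int) ∧ pvKey rl k = z := by
        intro z
        rw [← hRep, List.mem_map]
        constructor
        · rintro ⟨k, hk, hkey⟩
          exact ⟨k, List.mem_of_mem_filter hk, by simpa using (List.mem_filter.mp hk).2, hkey⟩
        · rintro ⟨k, hk1, hk2, hkey⟩
          exact ⟨k, List.mem_filter.mpr ⟨hk1, by simpa using hk2⟩, hkey⟩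
      have hmaxC : pvIsMax B0 ((r0 :: t0).map (pvKey rl)) := by
        constructor
        · rcases List.mem_cons.mp hmax0.1 with he | hm
          · rw [he]; simp
          · exact hm
        · intro z hz
          exact hmax0.2 z (List.mem_cons_of_mem _ hz)
      -- B's side
      have hgne : pvRuns S ≠ [] := by
        intro hnil
        have : ((List.count r0 rl : Int), r0) ∈ pvRuns S :=
          (hgmem _ r0).mpr ⟨(hmemD r0).mp hr0D, rfl, hr01⟩
        rw [hnil] at this
        simp at this
      rcases hgl : pvRuns S with _ | ⟨g0, gs⟩
      · exact absurd hgl hgne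
      · simp only [extract_shared_part_alt]
        rw [← hP, ← hS, hgl]
        rw [if_neg (by simp)]
        rw [show (List.map (fun g => (g.1, (g.2.length : Int))) (g0 :: gs))
              = ((g0.1, (g0.2.length : Int)) :: List.map (fun g => (g.1, (g.2.length : Int))) gs) from rfl]
        rw [pvMax2Eq]
        set bB := pvLexMax (g0.1, (g0.2.length : Int)) (gs.map (fun g => (g.1, (g.2.length : Int)))) with hbB
        have hmaxB := pvLexMax_isMax (gs.map (fun g => (g.1, (g.2.length : Int)))) (g0.1, (g0.2.length : Int))
        rw [← hbB] at hmaxB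
        -- the candidate values on B's side are the same set as on A's side
        have hLBmem : ∀ z, (z ∈ (g0.1, (g0.2.length : Int)) :: gs.map (fun g => (g.1, (g.2.length : Int))))
            ↔ ∃ k, k ∈ D ∧ 1 < (List.count k rl : Int) ∧ pvKey rl k = z := by
          intro z
          rw [show ((g0.1, (g0.2.length : Int)) :: gs.map (fun g => (g.1, (g.2.length : Int))))
                = (g0 :: gs).map (fun g => (g.1, (g.2.length : Int))) from rfl]
          rw [← hgl, List.mem_map]
          constructor
          · rintro ⟨⟨n, r⟩, hg2, hkey⟩
            rcases (hgmem n r).mp hg2 with ⟨hrp, h1, h2⟩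
            refine ⟨r, (hmemD r).mpr hrp, by omega, ?_⟩
            rw [← hkey, pvKey]
            simp [h1]
          · rintro ⟨k, hk1, hk2, hkey⟩
            refine ⟨((List.count k rl : Int), k), (hgmem _ k).mpr ⟨(hmemD k).mp hk1, rfl, hk2⟩, ?_⟩
            rw [← hkey, pvKey]
        have hmaxBC : pvIsMax bB ((r0 :: t0).map (pvKey rl)) := by
          constructor
          · exact (hCmem bB).mpr ((hLBmem bB).mp hmaxB.1)
          · intro z hz
            exact hmaxB.2 z ((hLBmem z).mpr ((hCmem z).mp hz))
        have hbBeq : bB = B0 := pvIsMax_uniq hmaxBC hmaxC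
        rw [hbBeq]
        dsimp only
        -- the first-occurrence scan finds A's winner
        have hwin : ∀ rel ∈ rl,
            ((((g0 :: gs).filter (fun g => g.1 == B0.1 && ((g.2.length : Int) == B0.2))).map (fun g => g.2)).contains rel)
              = (decide (rel ≠ []) && (pvKey rl rel == B0)) := by
          intro rel hrel
          rw [Bool.eq_iff_iff]
          simp only [List.contains_eq_mem, decide_eq_true_eq, List.mem_map, List.mem_filter,
            Bool.and_eq_true, beq_iff_eq]
          constructor
          · rintro ⟨⟨n, r⟩, ⟨hg2, hn, hlen⟩, hrel2⟩
            rw [← hgl] at hg2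
            rcases (hgmem n r).mp hg2 with ⟨hrp, h1, h2⟩
            subst hrel2
            dsimp only at hn hlen ⊢
            refine ⟨((hmemP r).mp hrp).2, ?_⟩
            rw [pvKey, ← h1, hn, hlen]
          · rintro ⟨hne, hkey⟩
            have hrp : rel ∈ P := (hmemP rel).mpr ⟨hrel, hne⟩
            have hcnt : (List.count rel rl : Int) = B0.1 := by
              rw [← hkey]; rfl
            have hlen : ((rel.length : Int)) = B0.2 := by
              rw [← hkey]; rfl
            refine ⟨((List.count rel rl : Int), rel), ⟨?_, by rw [hcnt], by rw [hlen]⟩, rfl⟩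
            rw [← hgl]
            exact (hgmem _ rel).mpr ⟨hrp, rfl, by omega⟩
        rw [pvFindCongr
          (p := fun rel => ((((g0 :: gs).filter (fun g => g.1 == B0.1 && ((g.2.length : Int) == B0.2))).map (fun g => g.2)).contains rel))
          (q := fun rel => (decide (rel ≠ []) && (pvKey rl rel == B0))) hwin]
        have hfiltered : List.find? (fun rel => decide (rel ≠ []) && (pvKey rl rel == B0)) rl
            = List.find? (fun k => pvKey rl k == B0) P := by
          rw [hP, List.find?_filter]
          apply pvFindCongr
          intro a _
          rw [Bool.eq_iff_iff]
          simp
        rw [hfiltered, ← pvFindOfList (fun k => pvKey rl k == B0) P, ← hD]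
        rcases hfind : D.find? (fun k => pvKey rl k == B0) with _ | w
        · exfalso
          rcases (hCmem B0).mp hmaxC.1 with ⟨k, hk1, hk2, hkey⟩
          have := List.find?_eq_none.mp hfind k hk1
          rw [hkey] at this
          simp at this
        · rfl
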